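-- pv_equiv track=rewrite | github.com/sssink/OR_opt | src/TSP.py | convert_to_path_vector
-- ===== SOURCE A (Python) =====
-- def convert_to_path_vector(connections):
--     from collections import defaultdict
--     graph = defaultdict(list)
--     for a, b in connections:
--         graph[a].append(b)
--     path_vector = []
--     visited = set()
--     def dfs(node):
--         visited.add(node)
--         path_vector.append(node)
--         for neighbor in graph[node]:
--             if neighbor not in visited:
--                 dfs(neighbor)
--     for node in graph.keys():
--         if node not in visited:
--             dfs(node)
--     return path_vector
-- ===== SOURCE B (Python) =====
-- def convert_to_path_vector(connections):
--     # Iterative DFS with an explicit stack; the output path itself is the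
--     # visited record (no separate visited set).
--     graph = {}
--     for a, b in connections:
--         graph.setdefault(a, []).append(b)
--     path = []
--     for start in graph:
--         if start in path:
--             continue
--         stack = [start]
--         while stack:
--             node = stack.pop()
--             if node in path:
--                 continue
--             path.append(node)
--             stack.extend(nb for nb in reversed(graph[node]) if nb not in path)
--     return path
-- ===== Notes on version B (the rewrite author's own statement) =====
-- stated objective: alternative
-- what changed: Replaces the recursive dfs closure and its separate visited set with an explicit-stack iterative DFS whose only state is the output path itself (membership in the path is the visited test), over a plain dict built with setdefault.
import Mathlib
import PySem

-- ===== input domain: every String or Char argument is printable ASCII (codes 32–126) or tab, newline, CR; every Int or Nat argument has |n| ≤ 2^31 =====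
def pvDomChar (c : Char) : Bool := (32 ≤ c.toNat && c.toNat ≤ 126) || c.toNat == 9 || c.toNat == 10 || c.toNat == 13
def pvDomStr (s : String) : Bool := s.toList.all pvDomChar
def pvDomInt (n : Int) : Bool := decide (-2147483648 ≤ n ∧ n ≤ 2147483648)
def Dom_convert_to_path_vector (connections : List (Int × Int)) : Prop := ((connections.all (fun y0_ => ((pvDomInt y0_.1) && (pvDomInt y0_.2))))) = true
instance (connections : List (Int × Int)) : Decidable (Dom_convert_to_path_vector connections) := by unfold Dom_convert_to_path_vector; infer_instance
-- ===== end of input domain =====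

-- B replaces A's recursive dfs closure (with its separate visited set) by an explicit-stack
-- iterative DFS whose only state is the output path itself.

-- ===== PORT A =====
-- A's recursive dfs. The fuel is a totality guard only: every call site passes more fuel
-- than the number of distinct nodes, so the 0 branch is never reached.
def dfsA (g : PySem.Dict Int (List Int)) : Nat → Int → PySem.Set Int × List Int → PySem.Set Int × List Int
  | 0, _, st => st
  | f+1, node, st =>
    (g.getD node []).foldl
      (fun st' nb => if st'.1.contains nb then st' else dfsA g f nb st')
      (st.1.add node, st.2 ++ [node])

def convert_to_path_vector (connections : List (Int × Int)) : List Int :=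
  -- graph = defaultdict(list); graph[a].append(b)
  let graph : PySem.Dict Int (List Int) :=
    connections.foldl (fun g p => g.modify p.1 [] (· ++ [p.2])) PySem.Dict.empty
  -- under Pre_ every node dfs reaches is a key of graph, so Python's `graph[node]` is getD node []
  (graph.keys.foldl
    (fun st node => if st.1.contains node then st else dfsA graph (2 * connections.length + 2) node st)
    ((PySem.Set.empty : PySem.Set Int), ([] : List Int))).2

-- ===== PORT B =====
-- B's while loop over an explicit stack, with the output path doubling as the visited
-- record ('node in path'). Python pops from the tail and extends with reversed(graph[node])
-- filtered; on a head-of-list stack this is exactly prepending the filtered neighbor list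
-- in original order; under Pre_ every popped node is a key of graph, so Python's
-- graph[node] is getD node []. Fuel is a totality guard only (one unit per pop;
-- pops are bounded by 1 + number of pushes ≤ 1 + len(connections) per start).
def runB (g : PySem.Dict Int (List Int)) : Nat → List Int → List Int → List Int
  | 0, _, path => path
  | _+1, [], path => path
  | f+1, node :: stack, path =>
    if path.contains node then runB g f stack path
    else
      let path' := path ++ [node]
      runB g f ((g.getD node []).filter (fun nb => !path'.contains nb) ++ stack) path'

def convert_to_path_vector_alt (connections : List (Int × Int)) : List Int :=
  -- graph = {}; graph.setdefault(a, []).append(b)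
  let graph : PySem.Dict Int (List Int) :=
    connections.foldl
      (fun g p =>
        let g' := g.setdefault p.1 []
        g'.insert p.1 (g'.getD p.1 [] ++ [p.2]))
      PySem.Dict.empty
  graph.keys.foldl
    (fun path start => if path.contains start then path
      else runB graph (2 * connections.length + 2) [start] path)
    ([] : List Int)

-- ===== PRECONDITION & SPEC =====
-- Pre_ excludes exactly the inputs where some edge target never occurs as an edge source:
-- there Python A's dfs touches the defaultdict at that sink node, inserting a new key while
-- `for node in graph.keys()` is iterating, and A raises RuntimeError instead of returning
-- (B's graph[node] lookup raises KeyError at the same sink).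
def Pre_convert_to_path_vector (connections : List (Int × Int)) : Prop :=
  ∀ p ∈ connections, ∃ q ∈ connections, q.1 = p.2
instance (connections : List (Int × Int)) : Decidable (Pre_convert_to_path_vector connections) := by
  unfold Pre_convert_to_path_vector; infer_instance

def pvWitness_convert_to_path_vector : (List (Int × Int)) := [(1, 1), (1, 2), (2, 1)]

def Spec_convert_to_path_vector (connections : List (Int × Int)) (out : List Int) : Prop := out = convert_to_path_vector_alt connections
instance (connections : List (Int × Int)) (out : List Int) : Decidable (Spec_convert_to_path_vector connections out) := by unfold Spec_convert_to_path_vector; infer_instance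

-- ===== CLAIM (what is proved, stated in full; the proofs are below) =====
def Claim_equal_convert_to_path_vector : Prop := ∀ (connections : List (Int × Int)), Dom_convert_to_path_vector connections → Pre_convert_to_path_vector connections → Spec_convert_to_path_vector connections (convert_to_path_vector connections)

-- ===== LEMMAS AND PROOFS =====

-- proof-side stack machine over (visited set, path) state; B's runB is coupled to it below
def runBS (g : PySem.Dict Int (List Int)) : Nat → List Int → PySem.Set Int × List Int → PySem.Set Int × List Int
  | 0, _, st => st
  | _+1, [], st => st
  | f+1, node :: stack, st =>
    if st.1.contains node then runBS g f stack st
    else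
      let vis := st.1.add node
      runBS g f ((g.getD node []).filter (fun nb => !vis.contains nb) ++ stack) (vis, st.2 ++ [node])

-- number of nodes of the universe list U not yet visited
def pvNv (U : List Int) (vis : PySem.Set Int) : Nat :=
  (U.filter (fun u => !vis.contains u)).length

-- total out-degree of the not-yet-visited keys of g
def pvDsum (g : PySem.Dict Int (List Int)) (vis : PySem.Set Int) : Nat :=
  ((g.keys.filter (fun k => !vis.contains k)).map (fun k => (g.getD k []).length)).sum

-- fuel-free wrappers: each machine run with exactly enough fuel
def pvDfsC (g : PySem.Dict Int (List Int)) (U : List Int) (n : Int) (st : PySem.Set Int × List Int) :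
    PySem.Set Int × List Int :=
  dfsA g (pvNv U st.1) n st

def pvRunC (g : PySem.Dict Int (List Int)) (s : List Int) (st : PySem.Set Int × List Int) :
    PySem.Set Int × List Int :=
  runBS g (s.length + pvDsum g st.1) s st

-- === small Bool/Set facts ===
theorem pv_bfalse {b : Bool} (h : ¬ b = true) : b = false := by
  cases b
  · rfl
  · exact absurd rfl h

theorem pv_contains_iff (s : PySem.Set Int) (x : Int) : s.contains x = true ↔ x ∈ s := by
  simp [PySem.Set.contains]

theorem pv_contains_add_self (vis : PySem.Set Int) (x : Int) : (vis.add x).contains x = true := by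
  rw [pv_contains_iff]
  unfold PySem.Set.add
  split_ifs with h
  · exact (pv_contains_iff vis x).mp h
  · simp

theorem pv_contains_add_of (vis : PySem.Set Int) (x y : Int) (h : vis.contains y = true) :
    (vis.add x).contains y = true := by
  rw [pv_contains_iff] at h ⊢
  unfold PySem.Set.add
  split_ifs with hx
  · exact h
  · exact List.mem_append_left _ h

theorem pv_contains_add_eq (vis : PySem.Set Int) (n x : Int) :
    (vis.add n).contains x = (vis.contains x || x == n) := by
  simp [PySem.Set.contains, PySem.Set.mem_add, Bool.beq_eq_decide_eq]

theorem pv_contains_snoc (l : List Int) (n x : Int) :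
    (l ++ [n]).contains x = (l.contains x || x == n) := by
  simp [Bool.beq_eq_decide_eq]

-- === counting facts ===
theorem pv_nv_le_of_sub (U : List Int) (vis vis' : PySem.Set Int)
    (h : ∀ y, vis.contains y = true → vis'.contains y = true) : pvNv U vis' ≤ pvNv U vis := by
  unfold pvNv
  rw [← List.countP_eq_length_filter, ← List.countP_eq_length_filter]
  apply List.countP_mono_left
  intro a _ ha
  by_cases hc : vis.contains a = true
  · rw [h a hc] at ha; simp at ha
  · rw [pv_bfalse hc]; rfl

theorem pv_countP_lt (p q : Int → Bool) (l : List Int) (hpq : ∀ a ∈ l, q a = true → p a = true)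
    (x : Int) (hx : x ∈ l) (hpx : p x = true) (hqx : q x = false) :
    l.countP q < l.countP p := by
  induction l with
  | nil => simp at hx
  | cons a t ih =>
    rw [List.countP_cons, List.countP_cons]
    rcases List.mem_cons.mp hx with rfl | hxt
    · rw [hpx, hqx]
      have hle : t.countP q ≤ t.countP p :=
        List.countP_mono_left (fun b hb => hpq b (List.mem_cons_of_mem _ hb))
      simp only [Bool.false_eq_true, if_false, if_true]
      omega
    · have ht : t.countP q < t.countP p :=
        ih (fun b hb => hpq b (List.mem_cons_of_mem _ hb)) hxt
      have hstep : (if q a = true then 1 else 0) ≤ (if p a = true then 1 else 0) := by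
        by_cases hqa : q a = true
        · simp [hqa, hpq a List.mem_cons_self hqa]
        · simp [pv_bfalse hqa]
      omega

theorem pv_nv_lt_of_add (U : List Int) (vis : PySem.Set Int) (x : Int)
    (hx : x ∈ U) (hnv : vis.contains x = false) : pvNv U (vis.add x) < pvNv U vis := by
  unfold pvNv
  rw [← List.countP_eq_length_filter, ← List.countP_eq_length_filter]
  apply pv_countP_lt (fun u => !vis.contains u) (fun u => !(vis.add x).contains u) U ?hpq x hx ?hpx ?hqx
  case hpq =>
    intro a _ ha
    change (!(vis.add x).contains a) = true at ha
    change (!vis.contains a) = true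
    by_cases hc : vis.contains a = true
    · rw [pv_contains_add_of vis x a hc] at ha; simp at ha
    · rw [pv_bfalse hc]; rfl
  case hpx =>
    change (!vis.contains x) = true
    rw [hnv]; rfl
  case hqx =>
    change (!(vis.add x).contains x) = false
    rw [pv_contains_add_self]; rfl

theorem pv_nv_pos (U : List Int) (vis : PySem.Set Int) (x : Int)
    (hx : x ∈ U) (hnv : vis.contains x = false) : 0 < pvNv U vis := by
  have := pv_nv_lt_of_add U vis x hx hnv
  omega

theorem pv_nv_le_len (U : List Int) (vis : PySem.Set Int) : pvNv U vis ≤ U.length :=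
  List.length_filter_le _ _

-- sums of Nat lists along sublists
theorem pv_sum_sublist_le (l₁ l₂ : List Nat) (h : List.Sublist l₁ l₂) : l₁.sum ≤ l₂.sum := by
  induction h with
  | slnil => simp
  | cons a _ ih => simp only [List.sum_cons]; omega
  | cons₂ a _ ih => simp only [List.sum_cons]; omega

theorem pv_sumW_mono (w : Int → Nat) (l : List Int) (vis vis' : PySem.Set Int)
    (h : ∀ y, vis.contains y = true → vis'.contains y = true) :
    ((l.filter (fun k => !vis'.contains k)).map w).sum ≤ ((l.filter (fun k => !vis.contains k)).map w).sum := by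
  apply pv_sum_sublist_le
  apply List.Sublist.map
  apply List.monotone_filter_right
  intro a ha
  by_cases hc : vis.contains a = true
  · rw [h a hc] at ha; simp at ha
  · rw [pv_bfalse hc]; rfl

theorem pv_sumW_add_le (w : Int → Nat) (vis : PySem.Set Int) (n : Int)
    (hnv : vis.contains n = false) :
    ∀ l : List Int, n ∈ l →
      w n + ((l.filter (fun k => !(vis.add n).contains k)).map w).sum
        ≤ ((l.filter (fun k => !vis.contains k)).map w).sum := by
  intro l
  induction l with
  | nil => intro hl; simp at hl
  | cons a t ih =>
    intro hl
    rw [List.filter_cons, List.filter_cons]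
    rcases List.mem_cons.mp hl with rfl | hat
    · rw [if_neg (by rw [pv_contains_add_self]; simp), if_pos (by rw [hnv]; rfl)]
      rw [List.map_cons, List.sum_cons]
      have := pv_sumW_mono w t vis (vis.add n) (fun y hy => pv_contains_add_of vis n y hy)
      omega
    · have ht := ih hat
      by_cases ha' : (!(vis.add n).contains a) = true
      · have haold : (!vis.contains a) = true := by
          by_cases hc : vis.contains a = true
          · rw [pv_contains_add_of vis n a hc] at ha'; simp at ha'
          · rw [pv_bfalse hc]; rfl
        rw [if_pos ha', if_pos haold, List.map_cons, List.map_cons, List.sum_cons, List.sum_cons]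
        omega
      · by_cases hold : (!vis.contains a) = true
        · rw [if_neg ha', if_pos hold, List.map_cons, List.sum_cons]
          omega
        · rw [if_neg ha', if_neg hold]
          exact ht

theorem pv_dsum_le_of_sub (g : PySem.Dict Int (List Int)) (vis vis' : PySem.Set Int)
    (h : ∀ y, vis.contains y = true → vis'.contains y = true) : pvDsum g vis' ≤ pvDsum g vis := by
  unfold pvDsum
  exact pv_sumW_mono _ _ _ _ h

theorem pv_dsum_add_le (g : PySem.Dict Int (List Int)) (vis : PySem.Set Int) (n : Int)
    (hk : n ∈ g.keys) (hnv : vis.contains n = false) :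
    (g.getD n []).length + pvDsum g (vis.add n) ≤ pvDsum g vis := by
  unfold pvDsum
  exact pv_sumW_add_le (fun k => (g.getD k []).length) vis n hnv g.keys hk

theorem pv_dsum_le_total (g : PySem.Dict Int (List Int)) (vis : PySem.Set Int) :
    pvDsum g vis ≤ ((g.keys.map (fun k => (g.getD k []).length)).sum) := by
  unfold pvDsum
  exact pv_sum_sublist_le _ _ (List.Sublist.map _ List.filter_sublist)

-- generic foldl invariant
theorem pv_foldl_inv {α : Type} (step : (PySem.Set Int × List Int) → α → (PySem.Set Int × List Int))
    (P : (PySem.Set Int × List Int) → Prop) (hstep : ∀ st a, P st → P (step st a)) :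
    ∀ (L : List α) (st : PySem.Set Int × List Int), P st → P (L.foldl step st) := by
  intro L
  induction L with
  | nil => intro st h; simpa using h
  | cons a t ih => intro st h; rw [List.foldl_cons]; exact ih _ (hstep st a h)

-- === A-side: visited set only grows ===
theorem pv_dfsA_mono (g : PySem.Dict Int (List Int)) :
    ∀ (f : Nat) (n : Int) (st : PySem.Set Int × List Int) (x : Int),
      st.1.contains x = true → (dfsA g f n st).1.contains x = true := by
  intro f
  induction f with
  | zero => intro n st x h; simpa [dfsA] using h
  | succ f ih =>
    intro n st x h
    rw [dfsA]
    apply pv_foldl_inv _ (fun st' => st'.1.contains x = true)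
    · intro st' a h'
      by_cases hc : st'.1.contains a = true
      · rwa [if_pos hc]
      · rw [if_neg hc]
        exact ih a st' x h'
    · exact pv_contains_add_of _ n x h

-- === A-side: fuel irrelevance (enough fuel computes pvDfsC) ===
theorem pv_dfsA_fuel (g : PySem.Dict Int (List Int)) (U : List Int)
    (HV : ∀ (n nb : Int), nb ∈ g.getD n [] → nb ∈ U) :
    ∀ (k f f' : Nat) (n : Int) (st : PySem.Set Int × List Int),
      pvNv U st.1 ≤ k → pvNv U st.1 ≤ f → pvNv U st.1 ≤ f' → st.1.contains n = false → n ∈ U →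
      dfsA g f n st = dfsA g f' n st := by
  intro k
  induction k using Nat.strong_induction_on with
  | _ k IH =>
    intro f f' n st hk hf hf' hn hU
    have hpos : 0 < pvNv U st.1 := pv_nv_pos U st.1 n hU hn
    obtain ⟨f0, rfl⟩ : ∃ f0, f = f0 + 1 := ⟨f - 1, by omega⟩
    obtain ⟨f0', rfl⟩ : ∃ f0', f' = f0' + 1 := ⟨f' - 1, by omega⟩
    rw [dfsA, dfsA]
    have hst₁ : pvNv U (st.1.add n) < pvNv U st.1 := pv_nv_lt_of_add U st.1 n hU hn
    have hL : ∀ nb ∈ g.getD n [], nb ∈ U := fun nb h => HV n nb h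
    have main : ∀ (L : List Int), (∀ nb ∈ L, nb ∈ U) →
        ∀ (st' : PySem.Set Int × List Int),
          pvNv U st'.1 ≤ f0 → pvNv U st'.1 ≤ f0' → pvNv U st'.1 < k →
          L.foldl (fun s nb => if s.1.contains nb then s else dfsA g f0 nb s) st'
            = L.foldl (fun s nb => if s.1.contains nb then s else dfsA g f0' nb s) st' := by
      intro L
      induction L with
      | nil => intro _ st' _ _ _; rfl
      | cons nb t iht =>
        intro hLU st' h0 h0' hlt
        rw [List.foldl_cons, List.foldl_cons]
        by_cases hc : st'.1.contains nb = true
        · rw [if_pos hc, if_pos hc]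
          exact iht (fun x hx => hLU x (List.mem_cons_of_mem _ hx)) st' h0 h0' hlt
        · have hc' : st'.1.contains nb = false := pv_bfalse hc
          rw [if_neg hc, if_neg hc]
          have hnbU : nb ∈ U := hLU nb List.mem_cons_self
          have heq : dfsA g f0 nb st' = dfsA g f0' nb st' :=
            IH (pvNv U st'.1) hlt f0 f0' nb st' le_rfl h0 h0' hc' hnbU
          rw [heq]
          have hmono : pvNv U (dfsA g f0' nb st').1 ≤ pvNv U st'.1 :=
            pv_nv_le_of_sub U st'.1 _ (fun y hy => pv_dfsA_mono g f0' nb st' y hy)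
          exact iht (fun x hx => hLU x (List.mem_cons_of_mem _ hx)) _
            (le_trans hmono h0) (le_trans hmono h0') (lt_of_le_of_lt hmono hlt)
    refine main _ hL _ ?_ ?_ ?_
    · show pvNv U (st.1.add n) ≤ f0
      omega
    · show pvNv U (st.1.add n) ≤ f0'
      omega
    · show pvNv U (st.1.add n) < k
      omega

theorem pv_dfsA_eq_dfsC (g : PySem.Dict Int (List Int)) (U : List Int)
    (HV : ∀ (n nb : Int), nb ∈ g.getD n [] → nb ∈ U)
    (f : Nat) (n : Int) (st : PySem.Set Int × List Int)
    (hf : pvNv U st.1 ≤ f) (hn : st.1.contains n = false) (hU : n ∈ U) :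
    dfsA g f n st = pvDfsC g U n st :=
  pv_dfsA_fuel g U HV (pvNv U st.1) f (pvNv U st.1) n st le_rfl hf le_rfl hn hU

-- a neighbor loop at any sufficient fuel is the pvDfsC loop
theorem pv_fold_dfsC (g : PySem.Dict Int (List Int)) (U : List Int)
    (HV : ∀ (n nb : Int), nb ∈ g.getD n [] → nb ∈ U)
    (fI : Nat) (L : List Int) (hL : ∀ nb ∈ L, nb ∈ U) :
    ∀ (st : PySem.Set Int × List Int), pvNv U st.1 ≤ fI →
      L.foldl (fun s nb => if s.1.contains nb then s else dfsA g fI nb s) st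
        = L.foldl (fun s nb => if s.1.contains nb then s else pvDfsC g U nb s) st := by
  induction L with
  | nil => intro st _; rfl
  | cons nb t iht =>
    intro st hst
    rw [List.foldl_cons, List.foldl_cons]
    by_cases hc : st.1.contains nb = true
    · rw [if_pos hc, if_pos hc]
      exact iht (fun x hx => hL x (List.mem_cons_of_mem _ hx)) st hst
    · have hc' : st.1.contains nb = false := pv_bfalse hc
      rw [if_neg hc, if_neg hc]
      rw [pv_dfsA_eq_dfsC g U HV fI nb st hst hc' (hL nb List.mem_cons_self)]
      have hmono : pvNv U (pvDfsC g U nb st).1 ≤ pvNv U st.1 :=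
        pv_nv_le_of_sub U st.1 _ (fun y hy => pv_dfsA_mono g _ nb st y hy)
      exact iht (fun x hx => hL x (List.mem_cons_of_mem _ hx)) _ (le_trans hmono hst)

theorem pv_dfsC_step (g : PySem.Dict Int (List Int)) (U : List Int)
    (HV : ∀ (n nb : Int), nb ∈ g.getD n [] → nb ∈ U)
    (n : Int) (st : PySem.Set Int × List Int)
    (hn : st.1.contains n = false) (hU : n ∈ U) :
    pvDfsC g U n st
      = (g.getD n []).foldl (fun s nb => if s.1.contains nb then s else pvDfsC g U nb s)
          (st.1.add n, st.2 ++ [n]) := by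
  have hpos : 0 < pvNv U st.1 := pv_nv_pos U st.1 n hU hn
  obtain ⟨m, hm⟩ : ∃ m, pvNv U st.1 = m + 1 := ⟨pvNv U st.1 - 1, by omega⟩
  unfold pvDfsC
  rw [hm, dfsA]
  apply pv_fold_dfsC g U HV m _ (fun nb h => HV n nb h)
  show pvNv U (st.1.add n) ≤ m
  have : pvNv U (st.1.add n) < pvNv U st.1 := pv_nv_lt_of_add U st.1 n hU hn
  omega

theorem pv_dfsC_mono (g : PySem.Dict Int (List Int)) (U : List Int)
    (n : Int) (st : PySem.Set Int × List Int) (x : Int) (h : st.1.contains x = true) :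
    (pvDfsC g U n st).1.contains x = true :=
  pv_dfsA_mono g _ n st x h

-- === stack-machine side ===
theorem pv_runBS_nil (g : PySem.Dict Int (List Int)) (f : Nat) (st : PySem.Set Int × List Int) :
    runBS g f [] st = st := by
  cases f <;> rfl

theorem pv_runBS_eq_runC (g : PySem.Dict Int (List Int)) (U : List Int)
    (HV : ∀ (n nb : Int), nb ∈ g.getD n [] → nb ∈ U) :
    ∀ (k : Nat) (s : List Int) (f : Nat) (st : PySem.Set Int × List Int),
      pvNv U st.1 ≤ k → (∀ x ∈ s, x ∈ U) → s.length + pvDsum g st.1 ≤ f →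
      runBS g f s st = pvRunC g s st := by
  intro k
  induction k using Nat.strong_induction_on with
  | _ k IH =>
    intro s
    induction s with
    | nil =>
      intro f st _ _ _
      rw [pv_runBS_nil]
      unfold pvRunC
      rw [pv_runBS_nil]
    | cons n s' ihs =>
      intro f st hk hs hf
      obtain ⟨f0, rfl⟩ : ∃ f0, f = f0 + 1 := ⟨f - 1, by simp at hf; omega⟩
      have hsu : ∀ x ∈ s', x ∈ U := fun x hx => hs x (List.mem_cons_of_mem _ hx)
      have hlen : s'.length + 1 + pvDsum g st.1 ≤ f0 + 1 := by simpa using hf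
      have hrc : pvRunC g (n :: s') st
          = runBS g (s'.length + pvDsum g st.1 + 1) (n :: s') st := by
        unfold pvRunC
        congr 1
        simp [Nat.add_right_comm]
      by_cases hcT : st.1.contains n = true
      · -- n already visited: skip
        rw [runBS, if_pos hcT, hrc, runBS, if_pos hcT]
        have h1 : runBS g f0 s' st = pvRunC g s' st := by
          apply ihs f0 st hk hsu
          omega
        have h2 : runBS g (s'.length + pvDsum g st.1) s' st = pvRunC g s' st :=
          ihs _ st hk hsu le_rfl
        rw [h1, h2]
      · -- visit n
        have hc : st.1.contains n = false := pv_bfalse hcT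
        have hnU : n ∈ U := hs n List.mem_cons_self
        have hnvlt : pvNv U (st.1.add n) < pvNv U st.1 := pv_nv_lt_of_add U st.1 n hnU hc
        rw [runBS, if_neg hcT, hrc, runBS, if_neg hcT]
        set flt := (g.getD n []).filter (fun nb => !(st.1.add n).contains nb) with hflt
        have hfltU : ∀ x ∈ flt ++ s', x ∈ U := by
          intro x hx
          rcases List.mem_append.mp hx with hx | hx
          · exact HV n x (List.mem_of_mem_filter hx)
          · exact hsu x hx
        have hbound : (flt ++ s').length + pvDsum g (st.1.add n) ≤ s'.length + pvDsum g st.1 := by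
          rw [List.length_append]
          have hfle : flt.length ≤ (g.getD n []).length := by
            rw [hflt]; exact List.length_filter_le _ _
          by_cases hkey : g.contains n = true
          · have hmem : n ∈ g.keys := (PySem.Dict.contains_iff_mem_keys g n).mp hkey
            have := pv_dsum_add_le g st.1 n hmem hc
            omega
          · have hget : g.getD n [] = [] :=
              PySem.Dict.getD_of_not_contains g [] (pv_bfalse hkey)
            have hfle0 : flt.length = 0 := by rw [hflt, hget]; rfl
            have := pv_dsum_le_of_sub g st.1 (st.1.add n)
              (fun y hy => pv_contains_add_of st.1 n y hy)
            omega
        have hds1 : pvDsum g (st.1.add n, st.2 ++ [n]).1 = pvDsum g (st.1.add n) := rfl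
        have hnv1 : pvNv U (st.1.add n, st.2 ++ [n]).1 = pvNv U (st.1.add n) := rfl
        have h1 : runBS g f0 (flt ++ s') (st.1.add n, st.2 ++ [n])
            = pvRunC g (flt ++ s') (st.1.add n, st.2 ++ [n]) := by
          apply IH (pvNv U (st.1.add n)) (by omega) (flt ++ s') f0 _ (by rw [hnv1]) hfltU
          omega
        have h2 : runBS g (s'.length + pvDsum g st.1) (flt ++ s') (st.1.add n, st.2 ++ [n])
            = pvRunC g (flt ++ s') (st.1.add n, st.2 ++ [n]) := by
          apply IH (pvNv U (st.1.add n)) (by omega) (flt ++ s') _ _ (by rw [hnv1]) hfltU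
          omega
        rw [h1, h2]

theorem pv_runC_nil (g : PySem.Dict Int (List Int)) (st : PySem.Set Int × List Int) :
    pvRunC g [] st = st := by
  unfold pvRunC
  rw [pv_runBS_nil]

theorem pv_runC_visited (g : PySem.Dict Int (List Int))
    (n : Int) (s : List Int) (st : PySem.Set Int × List Int)
    (hn : st.1.contains n = true) :
    pvRunC g (n :: s) st = pvRunC g s st := by
  have hrc : pvRunC g (n :: s) st = runBS g (s.length + pvDsum g st.1 + 1) (n :: s) st := by
    unfold pvRunC
    congr 1
    simp [Nat.add_right_comm]
  rw [hrc, runBS, if_pos hn]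
  rfl

theorem pv_runC_visit (g : PySem.Dict Int (List Int)) (U : List Int)
    (HV : ∀ (n nb : Int), nb ∈ g.getD n [] → nb ∈ U)
    (n : Int) (s : List Int) (st : PySem.Set Int × List Int)
    (hn : st.1.contains n = false) (hU : n ∈ U) (hs : ∀ x ∈ s, x ∈ U) :
    pvRunC g (n :: s) st
      = pvRunC g ((g.getD n []).filter (fun nb => !(st.1.add n).contains nb) ++ s)
          (st.1.add n, st.2 ++ [n]) := by
  have hrc : pvRunC g (n :: s) st = runBS g (s.length + pvDsum g st.1 + 1) (n :: s) st := by
    unfold pvRunC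
    congr 1
    simp [Nat.add_right_comm]
  rw [hrc, runBS, if_neg (by rw [hn]; simp)]
  set flt := (g.getD n []).filter (fun nb => !(st.1.add n).contains nb) with hflt
  have hnv1 : pvNv U (st.1.add n, st.2 ++ [n]).1 = pvNv U (st.1.add n) := rfl
  apply pv_runBS_eq_runC g U HV (pvNv U (st.1.add n)) _ _ _ (by rw [hnv1])
  · intro x hx
    rcases List.mem_append.mp hx with hx | hx
    · exact HV n x (List.mem_of_mem_filter hx)
    · exact hs x hx
  · show (flt ++ s).length + pvDsum g (st.1.add n) ≤ s.length + pvDsum g st.1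
    rw [List.length_append]
    have hfle : flt.length ≤ (g.getD n []).length := by
      rw [hflt]; exact List.length_filter_le _ _
    by_cases hkey : g.contains n = true
    · have hmem : n ∈ g.keys := (PySem.Dict.contains_iff_mem_keys g n).mp hkey
      have := pv_dsum_add_le g st.1 n hmem hn
      omega
    · have hget : g.getD n [] = [] :=
        PySem.Dict.getD_of_not_contains g [] (pv_bfalse hkey)
      have hfle0 : flt.length = 0 := by rw [hflt, hget]; rfl
      have := pv_dsum_le_of_sub g st.1 (st.1.add n)
        (fun y hy => pv_contains_add_of st.1 n y hy)
      omega

-- === dropping already-visited entries from the stack does not change the run ===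
theorem pv_runC_drop (g : PySem.Dict Int (List Int)) (U : List Int)
    (HV : ∀ (n nb : Int), nb ∈ g.getD n [] → nb ∈ U) :
    ∀ (k : Nat) (xs l s : List Int) (vis0 : PySem.Set Int) (st : PySem.Set Int × List Int),
      pvNv U st.1 ≤ k → (∀ y, vis0.contains y = true → st.1.contains y = true) →
      (∀ x ∈ xs, x ∈ U) → (∀ x ∈ l, x ∈ U) → (∀ x ∈ s, x ∈ U) →
      pvRunC g (xs ++ l.filter (fun e => !vis0.contains e) ++ s) st = pvRunC g (xs ++ l ++ s) st := by
  intro k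
  induction k using Nat.strong_induction_on with
  | _ k IH =>
    intro xs
    induction xs with
    | nil =>
      intro l
      induction l with
      | nil => intro s vis0 st _ _ _ _ _; rfl
      | cons e t ihl =>
        intro s vis0 st hk hsub _ hl hsU
        have htU : ∀ x ∈ t, x ∈ U := fun x hx => hl x (List.mem_cons_of_mem _ hx)
        have heU : e ∈ U := hl e List.mem_cons_self
        rw [List.nil_append, List.nil_append, List.filter_cons]
        by_cases h0 : vis0.contains e = true
        · -- dropped by the filter: e is visited in st
          rw [if_neg (by rw [h0]; simp)]
          have hc : st.1.contains e = true := hsub e h0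
          rw [List.cons_append, pv_runC_visited g e _ st hc]
          have := ihl s vis0 st hk hsub (by intro x hx; simp at hx) htU hsU
          simpa using this
        · -- kept by the filter
          have h0' : vis0.contains e = false := pv_bfalse h0
          rw [if_pos (by rw [h0']; rfl)]
          by_cases hcT : st.1.contains e = true
          · -- visited meanwhile: both sides skip e
            rw [List.cons_append, List.cons_append, pv_runC_visited g e _ st hcT,
              pv_runC_visited g e _ st hcT]
            have := ihl s vis0 st hk hsub (by intro x hx; simp at hx) htU hsU
            simpa using this
          · -- genuinely unvisited: both sides visit e
            have hc : st.1.contains e = false := pv_bfalse hcT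
            rw [List.cons_append, List.cons_append,
              pv_runC_visit g U HV e (t.filter (fun e => !vis0.contains e) ++ s) st hc heU
                (by intro x hx
                    rcases List.mem_append.mp hx with hx | hx
                    · exact htU x (List.mem_of_mem_filter hx)
                    · exact hsU x hx),
              pv_runC_visit g U HV e (t ++ s) st hc heU
                (by intro x hx
                    rcases List.mem_append.mp hx with hx | hx
                    · exact htU x hx
                    · exact hsU x hx)]
            have hlt : pvNv U (st.1.add e) < pvNv U st.1 := pv_nv_lt_of_add U st.1 e heU hc
            have hnv1 : pvNv U (st.1.add e, st.2 ++ [e]).1 = pvNv U (st.1.add e) := rfl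
            rw [← List.append_assoc, ← List.append_assoc]
            apply IH (pvNv U (st.1.add e)) (by omega)
              ((g.getD e []).filter (fun nb => !(st.1.add e).contains nb)) t s vis0 _
              (by rw [hnv1])
            · intro y hy
              exact pv_contains_add_of st.1 e y (hsub y hy)
            · intro x hx
              exact HV e x (List.mem_of_mem_filter hx)
            · exact htU
            · exact hsU
    | cons y xs' ihxs =>
      intro l s vis0 st hk hsub hxs hl hsU
      have hyU : y ∈ U := hxs y List.mem_cons_self
      have hxs' : ∀ x ∈ xs', x ∈ U := fun x hx => hxs x (List.mem_cons_of_mem _ hx)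
      rw [List.cons_append, List.cons_append, List.cons_append, List.cons_append]
      by_cases hcT : st.1.contains y = true
      · -- skip y on both sides
        rw [pv_runC_visited g y _ st hcT, pv_runC_visited g y _ st hcT]
        exact ihxs l s vis0 st hk hsub hxs' hl hsU
      · -- visit y on both sides
        have hc : st.1.contains y = false := pv_bfalse hcT
        rw [pv_runC_visit g U HV y _ st hc hyU
            (by intro x hx
                simp only [List.mem_append] at hx
                rcases hx with (hx | hx) | hx
                · exact hxs' x hx
                · exact hl x (List.mem_of_mem_filter hx)
                · exact hsU x hx),
          pv_runC_visit g U HV y _ st hc hyU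
            (by intro x hx
                simp only [List.mem_append] at hx
                rcases hx with (hx | hx) | hx
                · exact hxs' x hx
                · exact hl x hx
                · exact hsU x hx)]
        have hlt : pvNv U (st.1.add y) < pvNv U st.1 := pv_nv_lt_of_add U st.1 y hyU hc
        have hnv1 : pvNv U (st.1.add y, st.2 ++ [y]).1 = pvNv U (st.1.add y) := rfl
        have := IH (pvNv U (st.1.add y)) (by omega)
          ((g.getD y []).filter (fun nb => !(st.1.add y).contains nb) ++ xs') l s vis0
          (st.1.add y, st.2 ++ [y]) (by rw [hnv1])
          (fun z hz => pv_contains_add_of st.1 y z (hsub z hz))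
          (by intro x hx
              rcases List.mem_append.mp hx with hx | hx
              · exact HV y x (List.mem_of_mem_filter hx)
              · exact hxs' x hx)
          hl hsU
        simpa [List.append_assoc] using this

-- === the simulation: one stack entry behaves like one recursive dfs call ===
theorem pv_runC_dfsC (g : PySem.Dict Int (List Int)) (U : List Int)
    (HV : ∀ (n nb : Int), nb ∈ g.getD n [] → nb ∈ U) :
    ∀ (k : Nat) (st : PySem.Set Int × List Int) (n : Int) (t : List Int),
      pvNv U st.1 ≤ k → st.1.contains n = false → n ∈ U → (∀ x ∈ t, x ∈ U) →
      pvRunC g (n :: t) st = pvRunC g t (pvDfsC g U n st) := by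
  intro k
  induction k using Nat.strong_induction_on with
  | _ k IH =>
    intro st n t hk hn hU ht
    have hlt : pvNv U (st.1.add n) < pvNv U st.1 := pv_nv_lt_of_add U st.1 n hU hn
    have hpos : 0 < pvNv U st.1 := pv_nv_pos U st.1 n hU hn
    rw [pv_runC_visit g U HV n t st hn hU ht]
    rw [pv_dfsC_step g U HV n st hn hU]
    have hnv1 : pvNv U (st.1.add n, st.2 ++ [n]).1 = pvNv U (st.1.add n) := rfl
    have hdrop := pv_runC_drop g U HV (pvNv U (st.1.add n)) [] (g.getD n []) t
      (st.1.add n) (st.1.add n, st.2 ++ [n]) (by rw [hnv1]) (fun y hy => hy)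
      (by intro x hx; simp at hx)
      (fun x hx => HV n x hx) ht
    simp only [List.nil_append] at hdrop
    rw [hdrop]
    have main : ∀ (L : List Int), (∀ x ∈ L, x ∈ U) →
        ∀ (st' : PySem.Set Int × List Int), pvNv U st'.1 < k →
          pvRunC g (L ++ t) st'
            = pvRunC g t (L.foldl (fun s nb => if s.1.contains nb then s else pvDfsC g U nb s) st') := by
      intro L
      induction L with
      | nil => intro _ st' _; rfl
      | cons nb L' ihl =>
        intro hLU st' hlt'
        have hnbU : nb ∈ U := hLU nb List.mem_cons_self
        have hL'U : ∀ x ∈ L', x ∈ U := fun x hx => hLU x (List.mem_cons_of_mem _ hx)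
        rw [List.cons_append, List.foldl_cons]
        by_cases hcT : st'.1.contains nb = true
        · rw [if_pos hcT, pv_runC_visited g nb _ st' hcT]
          exact ihl hL'U st' hlt'
        · have hc : st'.1.contains nb = false := pv_bfalse hcT
          rw [if_neg hcT]
          rw [IH (pvNv U st'.1) hlt' st' nb (L' ++ t) le_rfl hc hnbU
            (by intro x hx
                rcases List.mem_append.mp hx with hx | hx
                · exact hL'U x hx
                · exact ht x hx)]
          have hmono : pvNv U (pvDfsC g U nb st').1 ≤ pvNv U st'.1 :=
            pv_nv_le_of_sub U st'.1 _ (fun y hy => pv_dfsC_mono g U nb st' y hy)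
          exact ihl hL'U _ (lt_of_le_of_lt hmono hlt')
    apply main _ (fun x hx => HV n x hx)
    rw [hnv1]
    omega

-- === the coupling: B's path-only machine runs in lockstep with runBS ===
theorem pv_couple (g : PySem.Dict Int (List Int)) :
    ∀ (f : Nat) (s : List Int) (vis : PySem.Set Int) (path : List Int),
      (∀ x : Int, vis.contains x = path.contains x) →
      runB g f s path = (runBS g f s (vis, path)).2
        ∧ (∀ x : Int, (runBS g f s (vis, path)).1.contains x = (runB g f s path).contains x) := by
  intro f
  induction f with
  | zero =>
    intro s vis path h
    exact ⟨rfl, fun x => h x⟩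
  | succ f ih =>
    intro s vis path h
    cases s with
    | nil => exact ⟨rfl, fun x => h x⟩
    | cons n t =>
      by_cases hc : path.contains n = true
      · have hv : (vis, path).1.contains n = true := by
          show vis.contains n = true
          rw [h n]; exact hc
        rw [runB, runBS, if_pos hc, if_pos hv]
        exact ih t vis path h
      · have hc' : path.contains n = false := pv_bfalse hc
        have hv : ¬ (vis, path).1.contains n = true := by
          show ¬ vis.contains n = true
          rw [h n, hc']; simp
        rw [runB, runBS, if_neg hc, if_neg hv]
        have h' : ∀ x : Int, (vis.add n).contains x = (path ++ [n]).contains x := by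
          intro x
          rw [pv_contains_add_eq, pv_contains_snoc, h x]
        have hflt : (g.getD n []).filter (fun nb => !(path ++ [n]).contains nb)
            = (g.getD n []).filter (fun nb => !(vis.add n).contains nb) := by
          apply List.filter_congr
          intro a _
          rw [h' a]
        show runB g f ((g.getD n []).filter (fun nb => !(path ++ [n]).contains nb) ++ t) (path ++ [n])
              = (runBS g f ((g.getD n []).filter (fun nb => !(vis.add n).contains nb) ++ t)
                  (vis.add n, path ++ [n])).2
            ∧ ∀ x : Int,
                (runBS g f ((g.getD n []).filter (fun nb => !(vis.add n).contains nb) ++ t)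
                  (vis.add n, path ++ [n])).1.contains x
                = (runB g f ((g.getD n []).filter (fun nb => !(path ++ [n]).contains nb) ++ t)
                    (path ++ [n])).contains x
        rw [hflt]
        exact ih _ (vis.add n) (path ++ [n]) h'

-- === the outer fold: B's path fold tracks A's (set, path) fold ===
theorem pv_fold_couple (g : PySem.Dict Int (List Int)) (U : List Int)
    (HV : ∀ (n nb : Int), nb ∈ g.getD n [] → nb ∈ U) (F : Nat)
    (hF1 : U.length ≤ F)
    (hF2 : ((g.keys.map (fun k => (g.getD k []).length)).sum) + 1 ≤ F) :
    ∀ (ks : List Int), (∀ k ∈ ks, k ∈ U) →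
    ∀ (vis : PySem.Set Int) (path : List Int), (∀ x : Int, vis.contains x = path.contains x) →
    ks.foldl (fun p st => if p.contains st then p else runB g F [st] p) path
      = (ks.foldl (fun st node => if st.1.contains node then st else dfsA g F node st) (vis, path)).2 := by
  intro ks
  induction ks with
  | nil => intro _ vis path _; rfl
  | cons k t ih =>
    intro hks vis path h
    have hkU : k ∈ U := hks k List.mem_cons_self
    have htU : ∀ x ∈ t, x ∈ U := fun x hx => hks x (List.mem_cons_of_mem _ hx)
    rw [List.foldl_cons, List.foldl_cons]
    by_cases hc : path.contains k = true
    · have hv : (vis, path).1.contains k = true := by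
        show vis.contains k = true
        rw [h k]; exact hc
      rw [if_pos hc, if_pos hv]
      exact ih htU vis path h
    · have hc' : path.contains k = false := pv_bfalse hc
      have hvf : (vis, path).1.contains k = false := by
        show vis.contains k = false
        rw [h k]; exact hc'
      rw [if_neg hc, if_neg (by rw [hvf]; simp)]
      -- one dfs call equals one single-start stack run
      have hnv : pvNv U (vis, path).1 ≤ F := le_trans (pv_nv_le_len U _) hF1
      have e1 : dfsA g F k (vis, path) = pvDfsC g U k (vis, path) :=
        pv_dfsA_eq_dfsC g U HV F k (vis, path) hnv hvf hkU
      have e2 : runBS g F [k] (vis, path) = pvRunC g [k] (vis, path) := by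
        apply pv_runBS_eq_runC g U HV (pvNv U (vis, path).1) [k] F (vis, path) le_rfl
        · intro x hx
          simp only [List.mem_singleton] at hx
          subst hx; exact hkU
        · show 1 + pvDsum g vis ≤ F
          have := pv_dsum_le_total g vis
          omega
      have e3 : pvRunC g [k] (vis, path) = pvDfsC g U k (vis, path) := by
        rw [pv_runC_dfsC g U HV (pvNv U (vis, path).1) (vis, path) k [] le_rfl hvf hkU
          (by intro x hx; simp at hx)]
        rw [pv_runC_nil]
      have eAB : runBS g F [k] (vis, path) = dfsA g F k (vis, path) := by
        rw [e2, e3, e1]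
      obtain ⟨hpath, hset⟩ := pv_couple g F [k] vis path h
      rcases hE : dfsA g F k (vis, path) with ⟨v2, p2⟩
      have hp2 : runB g F [k] path = p2 := by
        rw [hpath, eAB, hE]
      have hcpl : ∀ x : Int, v2.contains x = p2.contains x := by
        intro x
        have := hset x
        rw [eAB, hE] at this
        rw [this, hp2]
      rw [hp2]
      exact ih htU v2 p2 hcpl

-- === the two graph builds are the same dict ===
theorem pv_build_step_eq (d : PySem.Dict Int (List Int)) (a b : Int) :
    (let g' := d.setdefault a []
     g'.insert a (g'.getD a [] ++ [b])) = d.modify a [] (· ++ [b]) := by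
  show (d.setdefault a []).insert a ((d.setdefault a []).getD a [] ++ [b]) = _
  rw [PySem.Dict.getD_setdefault_self]
  unfold PySem.Dict.modify
  by_cases hc : d.contains a = true
  · rw [PySem.Dict.setdefault_of_contains d [] hc]
  · rw [PySem.Dict.setdefault_of_not_contains d [] (pv_bfalse hc)]
    exact PySem.Dict.insert_insert_self d a [] _

theorem pv_build_eq (connections : List (Int × Int)) :
    connections.foldl
      (fun g p =>
        let g' := g.setdefault p.1 []
        g'.insert p.1 (g'.getD p.1 [] ++ [p.2]))
      PySem.Dict.empty
    = connections.foldl (fun g p => g.modify p.1 [] (· ++ [p.2])) PySem.Dict.empty := by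
  apply PySem.List.foldl_congr_mem
  intro acc p _
  exact pv_build_step_eq acc p.1 p.2

-- keys / values of the built graph lie in the universe, total degree ≤ number of edges
theorem pv_build_keys_aux (P : Int → Prop) :
    ∀ (l : List (Int × Int)) (d : PySem.Dict Int (List Int)),
      (∀ k ∈ d.keys, P k) → (∀ p ∈ l, P p.1) →
      ∀ k ∈ (l.foldl (fun g p => g.modify p.1 [] (· ++ [p.2])) d).keys, P k := by
  intro l
  induction l with
  | nil => intro d hd _ k hk; exact hd k hk
  | cons p t ih =>
    intro d hd hl k hk
    rw [List.foldl_cons] at hk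
    apply ih (d.modify p.1 [] (· ++ [p.2]))
      (by intro k' hk'
          rw [PySem.Dict.keys_modify] at hk'
          rcases (PySem.Dict.mem_keys_insert _ _ _ _).mp hk' with rfl | hk'
          · exact hl p List.mem_cons_self
          · exact hd k' hk')
      (fun q hq => hl q (List.mem_cons_of_mem _ hq)) k hk

theorem pv_build_keys (connections : List (Int × Int)) :
    ∀ k ∈ (connections.foldl (fun g p => g.modify p.1 [] (· ++ [p.2])) PySem.Dict.empty).keys,
      k ∈ connections.map Prod.fst ++ connections.map Prod.snd := by
  apply pv_build_keys_aux
    (fun k => k ∈ connections.map Prod.fst ++ connections.map Prod.snd) connections PySem.Dict.empty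
  · intro k hk
    rw [PySem.Dict.keys_empty] at hk
    simp at hk
  · intro p hp
    exact List.mem_append_left _ (List.mem_map_of_mem hp)

theorem pv_build_values_aux (P : Int → Prop) :
    ∀ (l : List (Int × Int)) (d : PySem.Dict Int (List Int)),
      (∀ (n nb : Int), nb ∈ d.getD n [] → P nb) → (∀ p ∈ l, P p.2) →
      ∀ (n nb : Int), nb ∈ (l.foldl (fun g p => g.modify p.1 [] (· ++ [p.2])) d).getD n [] → P nb := by
  intro l
  induction l with
  | nil => intro d hd _ n nb h; exact hd n nb h
  | cons p t ih =>
    intro d hd hl n nb h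
    rw [List.foldl_cons] at h
    apply ih (d.modify p.1 [] (· ++ [p.2]))
      (by intro n' nb' h'
          rw [PySem.Dict.getD_modify] at h'
          by_cases he : n' = p.1
          · rw [if_pos he] at h'
            rcases List.mem_append.mp h' with h' | h'
            · exact hd p.1 nb' h'
            · simp at h'
              subst h'
              exact hl p List.mem_cons_self
          · rw [if_neg he] at h'
            exact hd n' nb' h')
      (fun q hq => hl q (List.mem_cons_of_mem _ hq)) n nb h

theorem pv_build_values (connections : List (Int × Int)) :
    ∀ (n nb : Int),
      nb ∈ (connections.foldl (fun g p => g.modify p.1 [] (· ++ [p.2])) PySem.Dict.empty).getD n [] →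
      nb ∈ connections.map Prod.fst ++ connections.map Prod.snd := by
  apply pv_build_values_aux
    (fun nb => nb ∈ connections.map Prod.fst ++ connections.map Prod.snd) connections PySem.Dict.empty
  · intro n nb h
    rw [PySem.Dict.getD_empty] at h
    simp at h
  · intro p hp
    exact List.mem_append_right _ (List.mem_map_of_mem hp)

-- sum over a Nodup list where one entry's weight grows by one
theorem pv_sum_update (l : List Int) (hnd : l.Nodup) (a : Int) (ha : a ∈ l)
    (f f' : Int → Nat) (hfa : f' a = f a + 1) (hne : ∀ x ∈ l, x ≠ a → f' x = f x) :
    (l.map f').sum = (l.map f).sum + 1 := by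
  induction l with
  | nil => simp at ha
  | cons b t ih =>
    rw [List.map_cons, List.map_cons, List.sum_cons, List.sum_cons]
    rcases List.mem_cons.mp ha with rfl | hat
    · have hta : ∀ x ∈ t, x ≠ a := by
        intro x hx he
        subst he
        exact (List.nodup_cons.mp hnd).1 hx
      have hmap : t.map f' = t.map f :=
        List.map_congr_left (fun x hx => hne x (List.mem_cons_of_mem _ hx) (hta x hx))
      rw [hmap, hfa]
      omega
    · have hba : b ≠ a := by
        intro he
        subst he
        exact (List.nodup_cons.mp hnd).1 hat
      rw [hne b List.mem_cons_self hba]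
      rw [ih (List.nodup_cons.mp hnd).2 hat (fun x hx => hne x (List.mem_cons_of_mem _ hx))]
      omega

theorem pv_nodup_keys_modify (d : PySem.Dict Int (List Int)) (a : Int) (f : List Int → List Int)
    (h : d.keys.Nodup) : (d.modify a [] f).keys.Nodup := by
  rw [PySem.Dict.keys_modify]
  exact PySem.Dict.nodup_keys_insert d a _ h

theorem pv_total_step (d : PySem.Dict Int (List Int)) (a b : Int) (hnd : d.keys.Nodup) :
    (((d.modify a [] (· ++ [b])).keys.map (fun k => ((d.modify a [] (· ++ [b])).getD k []).length)).sum)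
      = ((d.keys.map (fun k => (d.getD k []).length)).sum) + 1 := by
  by_cases hc : d.contains a = true
  · have hkeys : (d.modify a [] (· ++ [b])).keys = d.keys := by
      rw [PySem.Dict.keys_modify]
      exact PySem.Dict.keys_insert_of_contains d _ hc
    rw [hkeys]
    apply pv_sum_update d.keys hnd a ((PySem.Dict.contains_iff_mem_keys d a).mp hc)
    · rw [PySem.Dict.getD_modify, if_pos rfl]
      simp
    · intro x _ hx
      rw [PySem.Dict.getD_modify, if_neg hx]
  · have hc' : d.contains a = false := pv_bfalse hc
    have hkeys : (d.modify a [] (· ++ [b])).keys = d.keys ++ [a] := by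
      rw [PySem.Dict.keys_modify]
      exact PySem.Dict.keys_insert_of_not_contains d _ hc'
    rw [hkeys, List.map_append, List.sum_append]
    have hmap : d.keys.map (fun k => ((d.modify a [] (· ++ [b])).getD k []).length)
        = d.keys.map (fun k => (d.getD k []).length) := by
      apply List.map_congr_left
      intro x hx
      have hxa : ¬ x = a := by
        intro he
        subst he
        rw [(PySem.Dict.contains_iff_mem_keys d x).mpr hx] at hc'
        exact absurd hc' (by simp)
      rw [PySem.Dict.getD_modify, if_neg hxa]
    rw [hmap]
    have hone : ((d.modify a [] (· ++ [b])).getD a []).length = 1 := by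
      rw [PySem.Dict.getD_modify, if_pos rfl, PySem.Dict.getD_of_not_contains d [] hc']
      rfl
    simp only [List.map_cons, List.map_nil, List.sum_cons, List.sum_nil, hone]
    omega

theorem pv_build_total_aux :
    ∀ (l : List (Int × Int)) (d : PySem.Dict Int (List Int)), d.keys.Nodup →
      ((((l.foldl (fun g p => g.modify p.1 [] (· ++ [p.2])) d)).keys.map
          (fun k => ((l.foldl (fun g p => g.modify p.1 [] (· ++ [p.2])) d).getD k []).length)).sum)
        ≤ ((d.keys.map (fun k => (d.getD k []).length)).sum) + l.length := by
  intro l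
  induction l with
  | nil => intro d _; simp
  | cons p t ih =>
    intro d hnd
    rw [List.foldl_cons]
    have h1 := ih (d.modify p.1 [] (· ++ [p.2])) (pv_nodup_keys_modify d p.1 _ hnd)
    have h2 := pv_total_step d p.1 p.2 hnd
    rw [h2] at h1
    calc _ ≤ _ := h1
    _ ≤ _ := by simp [List.length_cons]; omega

theorem pv_build_total (connections : List (Int × Int)) :
    (((connections.foldl (fun g p => g.modify p.1 [] (· ++ [p.2])) PySem.Dict.empty).keys.map
        (fun k => ((connections.foldl (fun g p => g.modify p.1 [] (· ++ [p.2])) PySem.Dict.empty).getD k []).length)).sum)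
      ≤ connections.length := by
  have := pv_build_total_aux connections PySem.Dict.empty PySem.Dict.nodup_keys_empty
  simpa [PySem.Dict.keys_empty] using this

-- ===== VERDICT (by name: the statement is the Claim_ definition above) =====
theorem convert_to_path_vector_spec : Claim_equal_convert_to_path_vector := by
  intro c _ _
  unfold Spec_convert_to_path_vector
  unfold convert_to_path_vector convert_to_path_vector_alt
  simp only []
  rw [pv_build_eq c]
  set g := c.foldl (fun g p => g.modify p.1 [] (· ++ [p.2])) PySem.Dict.empty with hg
  set U := c.map Prod.fst ++ c.map Prod.snd with hU
  have HK : ∀ k ∈ g.keys, k ∈ U := pv_build_keys c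
  have HV : ∀ (n nb : Int), nb ∈ g.getD n [] → nb ∈ U := pv_build_values c
  have hUlen : U.length = 2 * c.length := by
    rw [hU, List.length_append, List.length_map, List.length_map]
    omega
  have htot : ((g.keys.map (fun k => (g.getD k []).length)).sum) ≤ c.length :=
    pv_build_total c
  symm
  apply pv_fold_couple g U HV (2 * c.length + 2) (by omega) (by omega) g.keys HK
    PySem.Set.empty []
  intro x
  simp [PySem.Set.contains, PySem.Set.empty]
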